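-- pv_equiv track=rewrite | github.com/cirnovsky/code | i.py | count_with_target
-- ===== SOURCE A (Python) =====
-- import bisect
--
-- MOD = 998244353
--
-- class SegmentTree:
--     def __init__(self, n):
--         # supports indices [0..n-1]
--         self.n = n
--         self.size = 1
--         while self.size < n:
--             self.size <<= 1
--         self.val = [0] * (2 * self.size)
--         self.lazy = [1] * (2 * self.size)
--
--     def _apply(self, idx, mul):
--         self.val[idx] = (self.val[idx] * mul) % MOD
--         self.lazy[idx] = (self.lazy[idx] * mul) % MOD
--
--     def _push(self, idx):
--         if self.lazy[idx] != 1: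
--             self._apply(idx*2, self.lazy[idx])
--             self._apply(idx*2+1, self.lazy[idx])
--             self.lazy[idx] = 1
--
--     def range_mul(self, l, r, mul, idx=1, lx=0, rx=None):
--         if rx is None:
--             rx = self.size
--         if l >= rx or r <= lx:
--             return
--         if l <= lx and rx <= r:
--             self._apply(idx, mul)
--             return
--         self._push(idx)
--         mid = (lx + rx) // 2
--         self.range_mul(l, r, mul, idx*2, lx, mid)
--         self.range_mul(l, r, mul, idx*2+1, mid, rx)
--         self.val[idx] = (self.val[idx*2] + self.val[idx*2+1]) % MOD
--
--     def point_add(self, pos, add, idx=1, lx=0, rx=None):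
--         if rx is None:
--             rx = self.size
--         if rx - lx == 1:
--             self.val[idx] = (self.val[idx] + add) % MOD
--             return
--         self._push(idx)
--         mid = (lx + rx) // 2
--         if pos < mid:
--             self.point_add(pos, add, idx*2, lx, mid)
--         else:
--             self.point_add(pos, add, idx*2+1, mid, rx)
--         self.val[idx] = (self.val[idx*2] + self.val[idx*2+1]) % MOD
--
--     def get_point(self, pos, idx=1, lx=0, rx=None):
--         if rx is None:
--             rx = self.size
--         if rx - lx == 1:
--             return self.val[idx]
--         self._push(idx)
--         mid = (lx + rx) // 2
--         if pos < mid: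
--             return self.get_point(pos, idx*2, lx, mid)
--         else:
--             return self.get_point(pos, idx*2+1, mid, rx)
--
-- def count_with_target(arr, target):
--     # counts subsequences of arr that produce exactly 'target' (strictly increasing)
--     k = len(target)
--     st = SegmentTree(k+1)   # dp indices 0..k
--     st.point_add(0, 1)      # dp[0] = 1
--     for x in arr:
--         pos = bisect.bisect_left(target, x)  # first index >= x
--         # If x equals next required element, we'll need dp[pos] (old value)
--         add = 0
--         if pos < k and target[pos] == x:
--             add = st.get_point(pos)
--         # Doubling affects dp[j] for j in [pos+1 .. k] (if any)
--         if pos + 1 <= k: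
--             st.range_mul(pos+1, k+1, 2)
--         if add:
--             st.point_add(pos+1, add)
--     # result is dp[k]
--     return st.get_point(k) % MOD
-- ===== SOURCE B (Python) =====
-- import bisect
--
-- MOD = 998244353
--
-- def count_with_target(arr, target):
--     # simpler: plain dp array with an explicit suffix-doubling loop instead of a lazy segment tree
--     k = len(target)
--     dp = [0] * (k + 1)
--     dp[0] = 1
--     for x in arr:
--         pos = bisect.bisect_left(target, x)
--         add = dp[pos] if pos < k and target[pos] == x else 0
--         for j in range(pos + 1, k + 1):
--             dp[j] = dp[j] * 2 % MOD
--         if pos < k: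
--             dp[pos + 1] = (dp[pos + 1] + add) % MOD
--     return dp[k] % MOD
-- ===== Notes on version B (the rewrite author's own statement) =====
-- stated objective: simpler
-- what changed: Replaces the lazy-propagation segment tree (suffix range-multiply, point-add, point-query) by a plain dp list of length k+1 updated in place with an explicit suffix-doubling loop.
import Mathlib
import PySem

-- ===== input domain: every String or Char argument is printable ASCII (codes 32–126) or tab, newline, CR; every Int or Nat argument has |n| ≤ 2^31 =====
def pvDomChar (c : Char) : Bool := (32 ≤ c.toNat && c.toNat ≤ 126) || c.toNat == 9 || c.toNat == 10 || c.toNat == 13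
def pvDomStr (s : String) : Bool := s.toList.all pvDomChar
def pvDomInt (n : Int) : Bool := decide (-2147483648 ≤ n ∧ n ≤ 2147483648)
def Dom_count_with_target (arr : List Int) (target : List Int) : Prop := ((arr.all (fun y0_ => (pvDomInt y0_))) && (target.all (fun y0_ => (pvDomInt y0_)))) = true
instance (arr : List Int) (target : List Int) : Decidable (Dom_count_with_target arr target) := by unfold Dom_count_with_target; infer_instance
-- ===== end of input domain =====

-- B replaces A's lazy segment tree by a plain dp list with an explicit suffix-doubling loop (simpler; return value only — neither mutates its arguments).

def MODp : Int := 998244353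

-- bisect.bisect_left (shared library call of both Pythons); fuel-based port of CPython's loop, fuel = len+1 always suffices
def bisectGo (a : List Int) (x : Int) : Nat → Nat → Nat → Nat
  | 0, lo, _ => lo
  | fuel+1, lo, hi =>
    if lo < hi then
      let mid := (lo + hi) / 2
      if a.getD mid 0 < x then bisectGo a x fuel (mid+1) hi else bisectGo a x fuel lo mid
    else lo

def pyBisectLeft (a : List Int) (x : Int) : Nat := bisectGo a x (a.length + 1) 0 a.length

-- ===== PORT A =====
structure SegT where
  n : Nat
  size : Nat
  val : List Int
  lazy : List Int

-- while self.size < n: self.size <<= 1  (fuel n suffices)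
def growSize (fuel : Nat) (size : Nat) (n : Nat) : Nat :=
  match fuel with
  | 0 => size
  | fuel+1 => if size < n then growSize fuel (size * 2) n else size

def SegT.init (n : Nat) : SegT :=
  let size := growSize n 1 n
  ⟨n, size, List.replicate (2*size) 0, List.replicate (2*size) 1⟩

def SegT.applyMul (t : SegT) (idx : Nat) (mul : Int) : SegT :=
  { t with val := t.val.set idx ((t.val.getD idx 0 * mul) % MODp),
           lazy := t.lazy.set idx ((t.lazy.getD idx 0 * mul) % MODp) }

def SegT.push (t : SegT) (idx : Nat) : SegT :=
  if t.lazy.getD idx 0 ≠ 1 then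
    let l := t.lazy.getD idx 0
    let t1 := (t.applyMul (2*idx) l).applyMul (2*idx+1) l
    { t1 with lazy := t1.lazy.set idx 1 }
  else t

-- range_mul; recursion made total with fuel (Python's recursion depth is ≤ log2 size + 1 < fuel as used)
def SegT.rangeMul (l r : Nat) (mul : Int) : SegT → Nat → Nat → Nat → Nat → SegT
  | t, 0, _, _, _ => t
  | t, fuel+1, idx, lx, rx =>
    if rx ≤ l ∨ r ≤ lx then t
    else if l ≤ lx ∧ rx ≤ r then t.applyMul idx mul
    else
      let t1 := t.push idx
      let mid := (lx + rx) / 2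
      let t2 := SegT.rangeMul l r mul t1 fuel (2*idx) lx mid
      let t3 := SegT.rangeMul l r mul t2 fuel (2*idx+1) mid rx
      { t3 with val := t3.val.set idx ((t3.val.getD (2*idx) 0 + t3.val.getD (2*idx+1) 0) % MODp) }

def SegT.pointAdd (pos : Nat) (add : Int) : SegT → Nat → Nat → Nat → Nat → SegT
  | t, 0, _, _, _ => t
  | t, fuel+1, idx, lx, rx =>
    if rx - lx = 1 then { t with val := t.val.set idx ((t.val.getD idx 0 + add) % MODp) }
    else
      let t1 := t.push idx
      let mid := (lx + rx) / 2
      let t2 := if pos < mid then SegT.pointAdd pos add t1 fuel (2*idx) lx mid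
                else SegT.pointAdd pos add t1 fuel (2*idx+1) mid rx
      { t2 with val := t2.val.set idx ((t2.val.getD (2*idx) 0 + t2.val.getD (2*idx+1) 0) % MODp) }

-- get_point mutates via pushes in Python; the port threads the updated tree alongside the result
def SegT.getPoint (pos : Nat) : SegT → Nat → Nat → Nat → Nat → Int × SegT
  | t, 0, _, _, _ => (0, t)
  | t, fuel+1, idx, lx, rx =>
    if rx - lx = 1 then (t.val.getD idx 0, t)
    else
      let t1 := t.push idx
      let mid := (lx + rx) / 2
      if pos < mid then SegT.getPoint pos t1 fuel (2*idx) lx mid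
      else SegT.getPoint pos t1 fuel (2*idx+1) mid rx

def count_with_target (arr : List Int) (target : List Int) : Int :=
  let k := target.length
  let st0 := SegT.init (k+1)
  let st1 := SegT.pointAdd 0 1 st0 (st0.size+1) 1 0 st0.size
  let stF := arr.foldl (fun t x =>
    let pos := pyBisectLeft target x
    let p := if pos < k ∧ target.getD pos 0 = x then SegT.getPoint pos t (t.size+1) 1 0 t.size else (0, t)
    let add := p.1
    let t1 := p.2
    let t2 := if pos + 1 ≤ k then SegT.rangeMul (pos+1) (k+1) 2 t1 (t1.size+1) 1 0 t1.size else t1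
    if add ≠ 0 then SegT.pointAdd (pos+1) add t2 (t2.size+1) 1 0 t2.size else t2) st1
  (SegT.getPoint k stF (stF.size+1) 1 0 stF.size).1 % MODp

-- ===== PORT B =====
-- for j in range(pos+1, k+1): dp[j] = dp[j]*2 % MOD   (List.range' (pos+1) (k-pos) = those indices, as pos ≤ k)
def count_with_target_alt (arr : List Int) (target : List Int) : Int :=
  let k := target.length
  let dp0 := (List.replicate (k+1) (0 : Int)).set 0 1
  let dpF := arr.foldl (fun dp x =>
    let pos := pyBisectLeft target x
    let add := if pos < k ∧ target.getD pos 0 = x then dp.getD pos 0 else 0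
    let dp1 := (List.range' (pos+1) (k - pos)).foldl (fun d j => d.set j ((d.getD j 0 * 2) % MODp)) dp
    if pos < k then dp1.set (pos+1) ((dp1.getD (pos+1) 0 + add) % MODp) else dp1) dp0
  dpF.getD k 0 % MODp

-- ===== PRECONDITION & SPEC =====
def Spec_count_with_target (arr : List Int) (target : List Int) (out : Int) : Prop := out = count_with_target_alt arr target
instance (arr : List Int) (target : List Int) (out : Int) : Decidable (Spec_count_with_target arr target out) := by unfold Spec_count_with_target; infer_instance

-- ===== CLAIM (what is proved, stated in full; the proofs are below) =====
def Claim_equal_count_with_target : Prop := ∀ (arr : List Int) (target : List Int), Dom_count_with_target arr target → Spec_count_with_target arr target (count_with_target arr target)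

-- ===== LEMMAS AND PROOFS =====

-- abstraction: the effective (pre-modular) value stored at leaf p of the subtree rooted at
-- node idx spanning [lx, rx), reading the raw val/lazy arrays
def eff (val lazy : List Int) : Nat → Nat → Nat → Nat → Nat → Int
  | 0, idx, _, _, _ => val.getD idx 0
  | f+1, idx, lx, rx, p =>
    let mid := (lx + rx) / 2
    lazy.getD idx 0 *
      (if p < mid then eff val lazy f (2*idx) lx mid p else eff val lazy f (2*idx+1) mid rx p)

-- j is a node of the subtree of idx, at relative depth ≤ f
def SegSub (idx f j : Nat) : Prop := ∃ e ≤ f, j / 2^e = idx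

def Rng1 (x : Int) : Prop := 0 ≤ x ∧ x < MODp

-- well-formed tree state for a fixed size s
def SOK (s : Nat) (t : SegT) : Prop :=
  t.size = s ∧ t.val.length = 2*s ∧ t.lazy.length = 2*s ∧
  ∀ j, Rng1 (t.val.getD j 0) ∧ Rng1 (t.lazy.getD j 0)

-- node idx spans [lx, rx) of width 2^f inside a tree of size s
def NodeInv (s f idx lx rx : Nat) : Prop := rx = lx + 2^f ∧ idx * 2^f = s + lx ∧ rx ≤ s

theorem MODp_pos : (0:Int) < MODp := by decide

theorem rng1_emod (x : Int) : Rng1 (x % MODp) :=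
  ⟨Int.emod_nonneg x (by decide), Int.emod_lt_of_pos x MODp_pos⟩

theorem getD_set_eq (l : List Int) (i : Nat) (v : Int) (h : i < l.length) :
    (l.set i v).getD i 0 = v := by
  simp [List.getD, h]

theorem getD_set_ne (l : List Int) (i j : Nat) (v : Int) (h : i ≠ j) :
    (l.set i v).getD j 0 = l.getD j 0 := by
  simp [List.getD, h]

theorem segSub_self (idx f : Nat) : SegSub idx f idx := ⟨0, Nat.zero_le _, by simp⟩

theorem sub_up (e j c : Nat) (h : j / 2^e = c) : j / 2^(e+1) = c / 2 := by
  rw [pow_succ, ← Nat.div_div_eq_div_mul, h]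

theorem sub_child_left (idx f j : Nat) (h : SegSub (2*idx) f j) : SegSub idx (f+1) j := by
  obtain ⟨e, he, hj⟩ := h
  exact ⟨e+1, by omega, by rw [sub_up e j _ hj]; omega⟩

theorem sub_child_right (idx f j : Nat) (h : SegSub (2*idx+1) f j) : SegSub idx (f+1) j := by
  obtain ⟨e, he, hj⟩ := h
  exact ⟨e+1, by omega, by rw [sub_up e j _ hj]; omega⟩

theorem div_pow_lt (j e c : Nat) (h : j / 2^e = c) (d : Nat) (hd : 1 ≤ d) :
    j / 2^(e+d) ≤ c / 2 := by
  have h2 : (2:Nat)^d ≥ 2 := by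
    calc (2:Nat) = 2^1 := by norm_num
    _ ≤ 2^d := Nat.pow_le_pow_right (by norm_num) hd
  have heq : j / 2^(e+d) = c / 2^d := by
    rw [pow_add, ← Nat.div_div_eq_div_mul, h]
  rw [heq]
  exact Nat.div_le_div_left h2 (by norm_num)

-- the subtrees of the two children of a node are disjoint
theorem sub_siblings (idx f f' j : Nat) (hidx : 1 ≤ idx)
    (h1 : SegSub (2*idx) f j) (h2 : SegSub (2*idx+1) f' j) : False := by
  obtain ⟨e, _, hj⟩ := h1
  obtain ⟨e', _, hj'⟩ := h2
  rcases Nat.lt_trichotomy e e' with h | h | h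
  · have := div_pow_lt j e (2*idx) hj (e' - e) (by omega)
    rw [show e + (e' - e) = e' by omega, hj'] at this; omega
  · rw [h, hj'] at hj; omega
  · have := div_pow_lt j e' (2*idx+1) hj' (e - e') (by omega)
    rw [show e' + (e - e') = e by omega, hj] at this; omega

-- a node is not inside either of its children's subtrees
theorem not_sub_strict (c f j : Nat) (hcj : j < c) : ¬ SegSub c f j := by
  rintro ⟨e, _, hj⟩
  have : j / 2^e ≤ j := Nat.div_le_self _ _
  omega

theorem eff_congr (val lazy val' lazy' : List Int) (f : Nat) :
    ∀ idx lx rx p, (∀ j, SegSub idx f j → val'.getD j 0 = val.getD j 0 ∧ lazy'.getD j 0 = lazy.getD j 0) →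
    eff val' lazy' f idx lx rx p = eff val lazy f idx lx rx p := by
  induction f with
  | zero => intro idx lx rx p h; simpa [eff] using (h idx (segSub_self idx 0)).1
  | succ f ih =>
    intro idx lx rx p h
    have hl := (h idx (segSub_self idx (f+1))).2
    simp only [eff, hl]
    congr 1
    split
    · exact ih (2*idx) lx ((lx+rx)/2) p (fun j hj => h j (sub_child_left idx f j hj))
    · exact ih (2*idx+1) ((lx+rx)/2) rx p (fun j hj => h j (sub_child_right idx f j hj))

theorem eff_zero (val lazy : List Int) (hv : ∀ j, val.getD j 0 = 0) (f : Nat) :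
    ∀ idx lx rx p, eff val lazy f idx lx rx p = 0 := by
  induction f with
  | zero => intro idx lx rx p; simp only [eff]; exact hv idx
  | succ f ih => intro idx lx rx p; simp only [eff]; split <;> simp [ih]

theorem nodeInv_bounds (s f idx lx rx : Nat) (h : NodeInv s f idx lx rx) :
    1 ≤ idx ∧ idx < 2*s ∧ lx < rx ∧ rx ≤ s ∧ 1 ≤ s := by
  obtain ⟨h1, h2, h3⟩ := h
  have hp : 0 < 2^f := Nat.two_pow_pos f
  have hidx : 1 ≤ idx := by
    rcases Nat.eq_zero_or_pos idx with h0 | h0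
    · rw [h0, Nat.zero_mul] at h2; omega
    · exact h0
  have hile : idx ≤ idx * 2^f := Nat.le_mul_of_pos_right idx hp
  have h2' : idx ≤ s + lx := h2 ▸ hile
  refine ⟨hidx, by omega, by omega, h3, by omega⟩

-- modular helpers
theorem emod_modEq (x : Int) : x % MODp ≡ x [ZMOD MODp] := Int.emod_emod_of_dvd x dvd_rfl

theorem modeq_rng_eq (a b : Int) (h : a ≡ b [ZMOD MODp]) (ha : Rng1 a) (hb : Rng1 b) : a = b := by
  have h' : a % MODp = b % MODp := h
  rwa [Int.emod_eq_of_lt ha.1 ha.2, Int.emod_eq_of_lt hb.1 hb.2] at h'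

theorem rng_getD_set (l : List Int) (i : Nat) (v : Int) (hv : Rng1 v)
    (h : ∀ j, Rng1 (l.getD j 0)) : ∀ j, Rng1 ((l.set i v).getD j 0) := by
  intro j
  by_cases hij : i = j
  · subst hij
    by_cases hlen : i < l.length
    · rw [getD_set_eq l i v hlen]; exact hv
    · rw [List.set_eq_of_length_le (by omega)]; exact h i
  · rw [getD_set_ne l i j v hij]; exact h j

theorem sok_set_val (s : Nat) (t : SegT) (i : Nat) (v : Int) (hS : SOK s t) (hv : Rng1 v) :
    SOK s { t with val := t.val.set i v } := by
  obtain ⟨h1, h2, h3, h4⟩ := hS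
  exact ⟨h1, by simpa using h2, h3, fun j => ⟨rng_getD_set _ _ _ hv (fun j => (h4 j).1) j, (h4 j).2⟩⟩

-- scaling both multipliers at the root of a subtree scales eff (mod M)
theorem eff_scale (m : Int) (f : Nat) :
    ∀ (val lazy val' lazy' : List Int) (c lx rx p : Nat), 1 ≤ c →
    val'.getD c 0 = (val.getD c 0 * m) % MODp →
    lazy'.getD c 0 = (lazy.getD c 0 * m) % MODp →
    (∀ j, SegSub c f j → j ≠ c → val'.getD j 0 = val.getD j 0 ∧ lazy'.getD j 0 = lazy.getD j 0) →
    eff val' lazy' f c lx rx p ≡ m * eff val lazy f c lx rx p [ZMOD MODp] := by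
  induction f with
  | zero =>
    intro val lazy val' lazy' c lx rx p hc hv _ _
    simp only [eff, hv]
    calc (val.getD c 0 * m) % MODp ≡ val.getD c 0 * m [ZMOD MODp] := emod_modEq _
      _ = m * val.getD c 0 := mul_comm _ _
  | succ f ih =>
    intro val lazy val' lazy' c lx rx p hc hv hz hrest
    have hkid : ∀ j, (SegSub (2*c) f j ∨ SegSub (2*c+1) f j) →
        val'.getD j 0 = val.getD j 0 ∧ lazy'.getD j 0 = lazy.getD j 0 := by
      intro j hj
      have hne : j ≠ c := by
        intro hjc
        subst hjc
        rcases hj with hj | hj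
        · exact not_sub_strict _ _ _ (by omega) hj
        · exact not_sub_strict _ _ _ (by omega) hj
      rcases hj with hj | hj
      · exact hrest j (sub_child_left c f j hj) hne
      · exact hrest j (sub_child_right c f j hj) hne
    have hL : eff val' lazy' f (2*c) lx ((lx+rx)/2) p = eff val lazy f (2*c) lx ((lx+rx)/2) p :=
      eff_congr _ _ _ _ f (2*c) lx ((lx+rx)/2) p (fun j hj => hkid j (Or.inl hj))
    have hR : eff val' lazy' f (2*c+1) ((lx+rx)/2) rx p = eff val lazy f (2*c+1) ((lx+rx)/2) rx p :=
      eff_congr _ _ _ _ f (2*c+1) ((lx+rx)/2) rx p (fun j hj => hkid j (Or.inr hj))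
    simp only [eff, hz, hL, hR]
    split
    · calc (lazy.getD c 0 * m) % MODp * eff val lazy f (2*c) lx ((lx+rx)/2) p
          ≡ lazy.getD c 0 * m * eff val lazy f (2*c) lx ((lx+rx)/2) p [ZMOD MODp] :=
            Int.ModEq.mul_right _ (emod_modEq _)
        _ = m * (lazy.getD c 0 * eff val lazy f (2*c) lx ((lx+rx)/2) p) := by ring
    · calc (lazy.getD c 0 * m) % MODp * eff val lazy f (2*c+1) ((lx+rx)/2) rx p
          ≡ lazy.getD c 0 * m * eff val lazy f (2*c+1) ((lx+rx)/2) rx p [ZMOD MODp] :=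
            Int.ModEq.mul_right _ (emod_modEq _)
        _ = m * (lazy.getD c 0 * eff val lazy f (2*c+1) ((lx+rx)/2) rx p) := by ring

theorem mid_eq (s f idx lx rx : Nat) (h : NodeInv s (f+1) idx lx rx) : (lx+rx)/2 = lx + 2^f := by
  obtain ⟨h1, _, _⟩ := h
  have h2 : (2:Nat)^(f+1) = 2*2^f := by rw [pow_succ]; ring
  omega

theorem nodeInv_left (s f idx lx rx : Nat) (h : NodeInv s (f+1) idx lx rx) :
    NodeInv s f (2*idx) lx ((lx+rx)/2) := by
  obtain ⟨h1, h2, h3⟩ := h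
  have hm := mid_eq s f idx lx rx ⟨h1, h2, h3⟩
  have h2' : 2*idx*2^f = idx*2^(f+1) := by rw [pow_succ]; ring
  have hp : (2:Nat)^(f+1) = 2*2^f := by rw [pow_succ]; ring
  exact ⟨by omega, by omega, by omega⟩

theorem nodeInv_right (s f idx lx rx : Nat) (h : NodeInv s (f+1) idx lx rx) :
    NodeInv s f (2*idx+1) ((lx+rx)/2) rx := by
  obtain ⟨h1, h2, h3⟩ := h
  have hm := mid_eq s f idx lx rx ⟨h1, h2, h3⟩
  have h2' : (2*idx+1)*2^f = idx*2^(f+1) + 2^f := by rw [pow_succ]; ring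
  have hp : (2:Nat)^(f+1) = 2*2^f := by rw [pow_succ]; ring
  exact ⟨by omega, by omega, by omega⟩

-- getD formulas for push (given a well-formed tree)
theorem push_val_getD (s : Nat) (t : SegT) (idx : Nat) (hS : SOK s t) (h1 : 1 ≤ idx)
    (h2 : 2*idx+1 < 2*s) (j : Nat) :
    (t.push idx).val.getD j 0 =
      if j = 2*idx ∨ j = 2*idx+1 then (t.val.getD j 0 * t.lazy.getD idx 0) % MODp
      else t.val.getD j 0 := by
  obtain ⟨_, hlv, hlz, hrng⟩ := hS
  by_cases hl1 : t.lazy.getD idx 0 = 1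
  · simp only [SegT.push, SegT.applyMul, hl1, ne_eq, not_true_eq_false, if_false]
    split
    · rw [mul_one, Int.emod_eq_of_lt (hrng j).1.1 (hrng j).1.2]
    · rfl
  · simp only [SegT.push, SegT.applyMul, ne_eq, hl1, not_false_eq_true, if_true]
    by_cases hj1 : j = 2*idx
    · subst hj1
      rw [if_pos (Or.inl rfl), getD_set_ne _ _ _ _ (by omega), getD_set_eq _ _ _ (by omega)]
    · by_cases hj2 : j = 2*idx+1
      · subst hj2
        rw [if_pos (Or.inr rfl), getD_set_eq _ _ _ (by simpa using (by omega : 2*idx+1 < t.val.length)),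
            getD_set_ne _ _ _ _ (by omega)]
      · rw [if_neg (by tauto), getD_set_ne _ _ _ _ (by omega), getD_set_ne _ _ _ _ (by omega)]

theorem push_lazy_getD (s : Nat) (t : SegT) (idx : Nat) (hS : SOK s t) (h1 : 1 ≤ idx)
    (h2 : 2*idx+1 < 2*s) (j : Nat) :
    (t.push idx).lazy.getD j 0 =
      if j = idx then 1
      else if j = 2*idx ∨ j = 2*idx+1 then (t.lazy.getD j 0 * t.lazy.getD idx 0) % MODp
      else t.lazy.getD j 0 := by
  obtain ⟨_, hlv, hlz, hrng⟩ := hS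
  by_cases hl1 : t.lazy.getD idx 0 = 1
  · simp only [SegT.push, SegT.applyMul, hl1, ne_eq, not_true_eq_false, if_false]
    by_cases hj : j = idx
    · subst hj; rw [if_pos rfl, hl1]
    · rw [if_neg hj]
      split
      · rw [mul_one, Int.emod_eq_of_lt (hrng j).2.1 (hrng j).2.2]
      · rfl
  · simp only [SegT.push, SegT.applyMul, ne_eq, hl1, not_false_eq_true, if_true]
    by_cases hj : j = idx
    · subst hj
      rw [if_pos rfl, getD_set_eq _ _ _ (by simpa using (by omega : j < t.lazy.length))]
    · rw [if_neg hj, getD_set_ne _ _ _ _ (fun h => hj h.symm)]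
      by_cases hj1 : j = 2*idx
      · subst hj1
        rw [if_pos (Or.inl rfl), getD_set_ne _ _ _ _ (by omega), getD_set_eq _ _ _ (by omega)]
      · by_cases hj2 : j = 2*idx+1
        · subst hj2
          rw [if_pos (Or.inr rfl), getD_set_eq _ _ _ (by simpa using (by omega : 2*idx+1 < t.lazy.length)),
              getD_set_ne _ _ _ _ (by omega)]
        · rw [if_neg (by tauto), getD_set_ne _ _ _ _ (by omega), getD_set_ne _ _ _ _ (by omega)]

theorem push_spec (s : Nat) (t : SegT) (f idx lx rx : Nat)
    (hS : SOK s t) (hN : NodeInv s (f+1) idx lx rx) :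
    SOK s (t.push idx) ∧
    (∀ j, ¬ SegSub idx (f+1) j → (t.push idx).val.getD j 0 = t.val.getD j 0 ∧ (t.push idx).lazy.getD j 0 = t.lazy.getD j 0) ∧
    (t.push idx).lazy.getD idx 0 = 1 ∧
    (∀ p, eff (t.push idx).val (t.push idx).lazy (f+1) idx lx rx p
      ≡ eff t.val t.lazy (f+1) idx lx rx p [ZMOD MODp]) := by
  have bI := nodeInv_bounds _ _ _ _ _ hN
  have bR := nodeInv_bounds _ _ _ _ _ (nodeInv_right s f idx lx rx hN)
  have h1 : 1 ≤ idx := bI.1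
  have h2 : 2*idx+1 < 2*s := bR.2.1
  have hv := push_val_getD s t idx hS h1 h2
  have hz := push_lazy_getD s t idx hS h1 h2
  have hsub2 : SegSub idx (f+1) (2*idx) := ⟨1, by omega, by omega⟩
  have hsub3 : SegSub idx (f+1) (2*idx+1) := ⟨1, by omega, by omega⟩
  refine ⟨?_, ?_, ?_, ?_⟩
  · obtain ⟨hs1, hs2, hs3, hs4⟩ := hS
    refine ⟨?_, ?_, ?_, ?_⟩
    · simp only [SegT.push, SegT.applyMul]; split <;> simpa using hs1
    · simp only [SegT.push, SegT.applyMul]; split <;> simp [hs2]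
    · simp only [SegT.push, SegT.applyMul]; split <;> simp [hs3]
    · intro j
      constructor
      · rw [hv j]; split
        · exact rng1_emod _
        · exact (hs4 j).1
      · rw [hz j]; split
        · exact ⟨by norm_num, by decide⟩
        · split
          · exact rng1_emod _
          · exact (hs4 j).2
  · intro j hj
    have hji : j ≠ idx := fun h => hj (h ▸ segSub_self idx (f+1))
    have hj2 : j ≠ 2*idx := fun h => hj (h ▸ hsub2)
    have hj3 : j ≠ 2*idx+1 := fun h => hj (h ▸ hsub3)
    rw [hv j, hz j, if_neg hji, if_neg (by tauto), if_neg (by tauto)]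
    exact ⟨rfl, rfl⟩
  · rw [hz idx, if_pos rfl]
  · intro p
    have hmid := mid_eq s f idx lx rx hN
    have hL : eff (t.push idx).val (t.push idx).lazy f (2*idx) lx ((lx+rx)/2) p
        ≡ t.lazy.getD idx 0 * eff t.val t.lazy f (2*idx) lx ((lx+rx)/2) p [ZMOD MODp] := by
      refine eff_scale _ f _ _ _ _ _ _ _ _ (by omega) ?_ ?_ ?_
      · rw [hv (2*idx), if_pos (Or.inl rfl)]
      · rw [hz (2*idx), if_neg (by omega), if_pos (Or.inl rfl)]
      · intro j hjsub hjne
        have hji : j ≠ idx := by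
          intro h; exact not_sub_strict (2*idx) f idx (by omega) (h ▸ hjsub)
        have hj3 : j ≠ 2*idx+1 := by
          intro h
          exact sub_siblings idx f 0 j h1 hjsub (h ▸ segSub_self (2*idx+1) 0)
        rw [hv j, hz j, if_neg hji, if_neg (by tauto), if_neg (by tauto)]
        exact ⟨rfl, rfl⟩
    have hR : eff (t.push idx).val (t.push idx).lazy f (2*idx+1) ((lx+rx)/2) rx p
        ≡ t.lazy.getD idx 0 * eff t.val t.lazy f (2*idx+1) ((lx+rx)/2) rx p [ZMOD MODp] := by
      refine eff_scale _ f _ _ _ _ _ _ _ _ (by omega) ?_ ?_ ?_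
      · rw [hv (2*idx+1), if_pos (Or.inr rfl)]
      · rw [hz (2*idx+1), if_neg (by omega), if_pos (Or.inr rfl)]
      · intro j hjsub hjne
        have hji : j ≠ idx := by
          intro h; exact not_sub_strict (2*idx+1) f idx (by omega) (h ▸ hjsub)
        have hj2 : j ≠ 2*idx := by
          intro h
          exact sub_siblings idx 0 f j h1 (h ▸ segSub_self (2*idx) 0) hjsub
        rw [hv j, hz j, if_neg hji, if_neg (by tauto), if_neg (by tauto)]
        exact ⟨rfl, rfl⟩
    have hz1 : (t.push idx).lazy.getD idx 0 = 1 := by rw [hz idx, if_pos rfl]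
    simp only [eff, hz1, one_mul]
    split
    · exact hL
    · exact hR

theorem eff_node_left (val lazy : List Int) (f idx lx rx p : Nat)
    (hlz : lazy.getD idx 0 = 1) (hp : p < (lx+rx)/2) :
    eff val lazy (f+1) idx lx rx p = eff val lazy f (2*idx) lx ((lx+rx)/2) p := by
  simp only [eff, hlz, one_mul, if_pos hp]

theorem eff_node_right (val lazy : List Int) (f idx lx rx p : Nat)
    (hlz : lazy.getD idx 0 = 1) (hp : ¬ p < (lx+rx)/2) :
    eff val lazy (f+1) idx lx rx p = eff val lazy f (2*idx+1) ((lx+rx)/2) rx p := by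
  simp only [eff, hlz, one_mul, if_neg hp]

theorem sok_applyMul (s : Nat) (t : SegT) (c : Nat) (m : Int) (hS : SOK s t) :
    SOK s (t.applyMul c m) := by
  obtain ⟨hs1, hs2, hs3, hs4⟩ := hS
  refine ⟨hs1, by simp [SegT.applyMul, hs2], by simp [SegT.applyMul, hs3], ?_⟩
  intro j
  constructor
  · exact rng_getD_set _ _ _ (rng1_emod _) (fun j => (hs4 j).1) j
  · exact rng_getD_set _ _ _ (rng1_emod _) (fun j => (hs4 j).2) j

theorem rangeMul_spec (s : Nat) (l r : Nat) (mul : Int) :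
    ∀ fuel f t idx lx rx, f < fuel → SOK s t → NodeInv s f idx lx rx →
    SOK s (SegT.rangeMul l r mul t fuel idx lx rx) ∧
    (∀ j, ¬ SegSub idx f j → (SegT.rangeMul l r mul t fuel idx lx rx).val.getD j 0 = t.val.getD j 0 ∧
        (SegT.rangeMul l r mul t fuel idx lx rx).lazy.getD j 0 = t.lazy.getD j 0) ∧
    (∀ p, lx ≤ p → p < rx →
      eff (SegT.rangeMul l r mul t fuel idx lx rx).val (SegT.rangeMul l r mul t fuel idx lx rx).lazy f idx lx rx p
        ≡ eff t.val t.lazy f idx lx rx p * (if l ≤ p ∧ p < r then mul else 1) [ZMOD MODp]) := by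
  intro fuel
  induction fuel with
  | zero => intro f t idx lx rx hf; omega
  | succ fuel ih =>
    intro f t idx lx rx hf hS hN
    have bI := nodeInv_bounds _ _ _ _ _ hN
    simp only [SegT.rangeMul]
    by_cases hdis : rx ≤ l ∨ r ≤ lx
    · rw [if_pos hdis]
      refine ⟨hS, fun j _ => ⟨rfl, rfl⟩, ?_⟩
      intro p hp1 hp2
      rw [if_neg (by omega), mul_one]
    · rw [if_neg hdis]
      by_cases hcov : l ≤ lx ∧ rx ≤ r
      · rw [if_pos hcov]
        refine ⟨sok_applyMul s t idx mul hS, ?_, ?_⟩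
        · intro j hj
          have hji : idx ≠ j := fun h => hj (h ▸ segSub_self idx f)
          constructor
          · show (t.val.set idx _).getD j 0 = _
            rw [getD_set_ne _ _ _ _ hji]
          · show (t.lazy.set idx _).getD j 0 = _
            rw [getD_set_ne _ _ _ _ hji]
        · intro p hp1 hp2
          rw [if_pos (by omega)]
          have h := eff_scale mul f t.val t.lazy (t.applyMul idx mul).val (t.applyMul idx mul).lazy
            idx lx rx p bI.1 ?_ ?_ ?_
          · have h2 : mul * eff t.val t.lazy f idx lx rx p = eff t.val t.lazy f idx lx rx p * mul :=
              mul_comm _ _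
            exact h2 ▸ h
          · show (t.val.set idx _).getD idx 0 = _
            exact getD_set_eq _ _ _ (by rw [hS.2.1]; omega)
          · show (t.lazy.set idx _).getD idx 0 = _
            exact getD_set_eq _ _ _ (by rw [hS.2.2.1]; omega)
          · intro j hjs hjne
            exact ⟨getD_set_ne _ _ _ _ (fun h => hjne h.symm), getD_set_ne _ _ _ _ (fun h => hjne h.symm)⟩
      · rw [if_neg hcov]
        obtain ⟨f', rfl⟩ : ∃ f', f = f'+1 := by
          cases f with
          | zero =>
            exfalso
            obtain ⟨h1, h2, h3⟩ := hN
            simp only [pow_zero] at h1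
            omega
          | succ f' => exact ⟨f', rfl⟩
        have hmid := mid_eq s f' idx lx rx hN
        have hNL := nodeInv_left s f' idx lx rx hN
        have hNR := nodeInv_right s f' idx lx rx hN
        obtain ⟨hP_SOK, hP_frame, hP_lz1, hP_eff⟩ := push_spec s t f' idx lx rx hS hN
        obtain ⟨hL_SOK, hL_frame, hL_eff⟩ :=
          ih f' (t.push idx) (2*idx) lx ((lx+rx)/2) (by omega) hP_SOK hNL
        set t2 := SegT.rangeMul l r mul (t.push idx) fuel (2*idx) lx ((lx+rx)/2) with ht2
        obtain ⟨hR_SOK, hR_frame, hR_eff⟩ :=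
          ih f' t2 (2*idx+1) ((lx+rx)/2) rx (by omega) hL_SOK hNR
        set t3 := SegT.rangeMul l r mul t2 fuel (2*idx+1) ((lx+rx)/2) rx with ht3
        show SOK s { t3 with val := t3.val.set idx ((t3.val.getD (2*idx) 0 + t3.val.getD (2*idx+1) 0) % MODp) } ∧ _ ∧ _
        have hz3 : t3.lazy.getD idx 0 = 1 := by
          rw [(hR_frame idx (not_sub_strict _ _ _ (by omega))).2,
              (hL_frame idx (not_sub_strict _ _ _ (by omega))).2, hP_lz1]
        refine ⟨sok_set_val s t3 idx _ hR_SOK (rng1_emod _), ?_, ?_⟩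
        · intro j hj
          have hji : idx ≠ j := fun h => hj (h ▸ segSub_self idx (f'+1))
          have hjL : ¬ SegSub (2*idx) f' j := fun h => hj (sub_child_left _ _ _ h)
          have hjR : ¬ SegSub (2*idx+1) f' j := fun h => hj (sub_child_right _ _ _ h)
          constructor
          · show (t3.val.set idx _).getD j 0 = _
            rw [getD_set_ne _ _ _ _ hji, (hR_frame j hjR).1, (hL_frame j hjL).1, (hP_frame j hj).1]
          · show t3.lazy.getD j 0 = _
            rw [(hR_frame j hjR).2, (hL_frame j hjL).2, (hP_frame j hj).2]
        · intro p hp1 hp2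
          have hzt : ({ t3 with val := t3.val.set idx ((t3.val.getD (2*idx) 0 + t3.val.getD (2*idx+1) 0) % MODp) } : SegT).lazy = t3.lazy := rfl
          by_cases hp : p < (lx+rx)/2
          · rw [eff_node_left _ _ f' idx lx rx p (by rw [hzt]; exact hz3) hp]
            have e1 : eff (t3.val.set idx ((t3.val.getD (2*idx) 0 + t3.val.getD (2*idx+1) 0) % MODp)) t3.lazy f' (2*idx) lx ((lx+rx)/2) p
                = eff t3.val t3.lazy f' (2*idx) lx ((lx+rx)/2) p := by
              refine eff_congr _ _ _ _ f' (2*idx) lx ((lx+rx)/2) p ?_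
              intro j hj
              have : idx ≠ j := fun h => not_sub_strict (2*idx) f' idx (by omega) (h ▸ hj)
              exact ⟨getD_set_ne _ _ _ _ this, rfl⟩
            have e2 : eff t3.val t3.lazy f' (2*idx) lx ((lx+rx)/2) p
                = eff t2.val t2.lazy f' (2*idx) lx ((lx+rx)/2) p := by
              refine eff_congr _ _ _ _ f' (2*idx) lx ((lx+rx)/2) p ?_
              intro j hj
              exact hR_frame j (fun hc => sub_siblings idx f' f' j bI.1 hj hc)
            have e3 := hL_eff p hp1 hp
            have e4 : eff (t.push idx).val (t.push idx).lazy (f'+1) idx lx rx p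
                = eff (t.push idx).val (t.push idx).lazy f' (2*idx) lx ((lx+rx)/2) p :=
              eff_node_left _ _ f' idx lx rx p hP_lz1 hp
            calc eff (t3.val.set idx ((t3.val.getD (2*idx) 0 + t3.val.getD (2*idx+1) 0) % MODp)) t3.lazy f' (2*idx) lx ((lx+rx)/2) p
                = eff t2.val t2.lazy f' (2*idx) lx ((lx+rx)/2) p := by rw [e1, e2]
              _ ≡ eff (t.push idx).val (t.push idx).lazy f' (2*idx) lx ((lx+rx)/2) p * (if l ≤ p ∧ p < r then mul else 1) [ZMOD MODp] := e3
              _ = eff (t.push idx).val (t.push idx).lazy (f'+1) idx lx rx p * (if l ≤ p ∧ p < r then mul else 1) := by rw [e4]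
              _ ≡ eff t.val t.lazy (f'+1) idx lx rx p * (if l ≤ p ∧ p < r then mul else 1) [ZMOD MODp] :=
                  Int.ModEq.mul_right _ (hP_eff p)
          · rw [eff_node_right _ _ f' idx lx rx p (by rw [hzt]; exact hz3) hp]
            have e1 : eff (t3.val.set idx ((t3.val.getD (2*idx) 0 + t3.val.getD (2*idx+1) 0) % MODp)) t3.lazy f' (2*idx+1) ((lx+rx)/2) rx p
                = eff t3.val t3.lazy f' (2*idx+1) ((lx+rx)/2) rx p := by
              refine eff_congr _ _ _ _ f' (2*idx+1) ((lx+rx)/2) rx p ?_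
              intro j hj
              have : idx ≠ j := fun h => not_sub_strict (2*idx+1) f' idx (by omega) (h ▸ hj)
              exact ⟨getD_set_ne _ _ _ _ this, rfl⟩
            have e2' : eff t2.val t2.lazy f' (2*idx+1) ((lx+rx)/2) rx p
                = eff (t.push idx).val (t.push idx).lazy f' (2*idx+1) ((lx+rx)/2) rx p := by
              refine eff_congr _ _ _ _ f' (2*idx+1) ((lx+rx)/2) rx p ?_
              intro j hj
              exact hL_frame j (fun hc => sub_siblings idx f' f' j bI.1 hc hj)
            have e3 := hR_eff p (by omega) hp2
            have e4 : eff (t.push idx).val (t.push idx).lazy (f'+1) idx lx rx p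
                = eff (t.push idx).val (t.push idx).lazy f' (2*idx+1) ((lx+rx)/2) rx p :=
              eff_node_right _ _ f' idx lx rx p hP_lz1 hp
            calc eff (t3.val.set idx ((t3.val.getD (2*idx) 0 + t3.val.getD (2*idx+1) 0) % MODp)) t3.lazy f' (2*idx+1) ((lx+rx)/2) rx p
                = eff t3.val t3.lazy f' (2*idx+1) ((lx+rx)/2) rx p := e1
              _ ≡ eff t2.val t2.lazy f' (2*idx+1) ((lx+rx)/2) rx p * (if l ≤ p ∧ p < r then mul else 1) [ZMOD MODp] := e3
              _ = eff (t.push idx).val (t.push idx).lazy f' (2*idx+1) ((lx+rx)/2) rx p * (if l ≤ p ∧ p < r then mul else 1) := by rw [e2']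
              _ = eff (t.push idx).val (t.push idx).lazy (f'+1) idx lx rx p * (if l ≤ p ∧ p < r then mul else 1) := by rw [e4]
              _ ≡ eff t.val t.lazy (f'+1) idx lx rx p * (if l ≤ p ∧ p < r then mul else 1) [ZMOD MODp] :=
                  Int.ModEq.mul_right _ (hP_eff p)

theorem pointAdd_spec (s : Nat) (pos : Nat) (add : Int) :
    ∀ fuel f t idx lx rx, f < fuel → SOK s t → NodeInv s f idx lx rx → lx ≤ pos → pos < rx →
    SOK s (SegT.pointAdd pos add t fuel idx lx rx) ∧
    (∀ j, ¬ SegSub idx f j → (SegT.pointAdd pos add t fuel idx lx rx).val.getD j 0 = t.val.getD j 0 ∧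
        (SegT.pointAdd pos add t fuel idx lx rx).lazy.getD j 0 = t.lazy.getD j 0) ∧
    (∀ p, lx ≤ p → p < rx →
      eff (SegT.pointAdd pos add t fuel idx lx rx).val (SegT.pointAdd pos add t fuel idx lx rx).lazy f idx lx rx p
        ≡ eff t.val t.lazy f idx lx rx p + (if p = pos then add else 0) [ZMOD MODp]) := by
  intro fuel
  induction fuel with
  | zero => intro f t idx lx rx hf; omega
  | succ fuel ih =>
    intro f t idx lx rx hf hS hN hpos1 hpos2
    have bI := nodeInv_bounds _ _ _ _ _ hN
    simp only [SegT.pointAdd]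
    by_cases hleaf : rx - lx = 1
    · rw [if_pos hleaf]
      have hf0 : f = 0 := by
        cases f with
        | zero => rfl
        | succ f' =>
          exfalso
          obtain ⟨h1, _, _⟩ := hN
          have : (2:Nat) ≤ 2^(f'+1) := by
            calc (2:Nat) = 2^1 := by norm_num
              _ ≤ 2^(f'+1) := Nat.pow_le_pow_right (by norm_num) (by omega)
          omega
      subst hf0
      refine ⟨sok_set_val s t idx _ hS (rng1_emod _), ?_, ?_⟩
      · intro j hj
        have hji : idx ≠ j := fun h => hj (h ▸ segSub_self idx 0)
        exact ⟨getD_set_ne _ _ _ _ hji, rfl⟩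
      · intro p hp1 hp2
        have hpp : p = pos := by omega
        show eff (t.val.set idx ((t.val.getD idx 0 + add) % MODp)) t.lazy 0 idx lx rx p ≡ _ [ZMOD MODp]
        simp only [eff]
        rw [getD_set_eq _ _ _ (by rw [hS.2.1]; omega), if_pos hpp]
        exact emod_modEq _
    · rw [if_neg hleaf]
      obtain ⟨f', rfl⟩ : ∃ f', f = f'+1 := by
        cases f with
        | zero =>
          exfalso
          obtain ⟨h1, _, _⟩ := hN
          simp only [pow_zero] at h1
          omega
        | succ f' => exact ⟨f', rfl⟩
      have hmid := mid_eq s f' idx lx rx hN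
      have hNL := nodeInv_left s f' idx lx rx hN
      have hNR := nodeInv_right s f' idx lx rx hN
      obtain ⟨hP_SOK, hP_frame, hP_lz1, hP_eff⟩ := push_spec s t f' idx lx rx hS hN
      by_cases hpm : pos < (lx+rx)/2
      · rw [if_pos hpm]
        obtain ⟨hL_SOK, hL_frame, hL_eff⟩ :=
          ih f' (t.push idx) (2*idx) lx ((lx+rx)/2) (by omega) hP_SOK hNL hpos1 hpm
        set t2 := SegT.pointAdd pos add (t.push idx) fuel (2*idx) lx ((lx+rx)/2) with ht2
        show SOK s { t2 with val := t2.val.set idx ((t2.val.getD (2*idx) 0 + t2.val.getD (2*idx+1) 0) % MODp) } ∧ _ ∧ _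
        have hz2 : t2.lazy.getD idx 0 = 1 := by
          rw [(hL_frame idx (not_sub_strict _ _ _ (by omega))).2, hP_lz1]
        refine ⟨sok_set_val s t2 idx _ hL_SOK (rng1_emod _), ?_, ?_⟩
        · intro j hj
          have hji : idx ≠ j := fun h => hj (h ▸ segSub_self idx (f'+1))
          have hjL : ¬ SegSub (2*idx) f' j := fun h => hj (sub_child_left _ _ _ h)
          constructor
          · show (t2.val.set idx _).getD j 0 = _
            rw [getD_set_ne _ _ _ _ hji, (hL_frame j hjL).1, (hP_frame j hj).1]
          · show t2.lazy.getD j 0 = _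
            rw [(hL_frame j hjL).2, (hP_frame j hj).2]
        · intro p hp1 hp2
          have hzt : ({ t2 with val := t2.val.set idx ((t2.val.getD (2*idx) 0 + t2.val.getD (2*idx+1) 0) % MODp) } : SegT).lazy = t2.lazy := rfl
          by_cases hp : p < (lx+rx)/2
          · rw [eff_node_left _ _ f' idx lx rx p (by rw [hzt]; exact hz2) hp]
            have e1 : eff (t2.val.set idx ((t2.val.getD (2*idx) 0 + t2.val.getD (2*idx+1) 0) % MODp)) t2.lazy f' (2*idx) lx ((lx+rx)/2) p
                = eff t2.val t2.lazy f' (2*idx) lx ((lx+rx)/2) p := by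
              refine eff_congr _ _ _ _ f' (2*idx) lx ((lx+rx)/2) p ?_
              intro j hj
              have : idx ≠ j := fun h => not_sub_strict (2*idx) f' idx (by omega) (h ▸ hj)
              exact ⟨getD_set_ne _ _ _ _ this, rfl⟩
            have e4 : eff (t.push idx).val (t.push idx).lazy (f'+1) idx lx rx p
                = eff (t.push idx).val (t.push idx).lazy f' (2*idx) lx ((lx+rx)/2) p :=
              eff_node_left _ _ f' idx lx rx p hP_lz1 hp
            calc eff (t2.val.set idx ((t2.val.getD (2*idx) 0 + t2.val.getD (2*idx+1) 0) % MODp)) t2.lazy f' (2*idx) lx ((lx+rx)/2) p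
                = eff t2.val t2.lazy f' (2*idx) lx ((lx+rx)/2) p := e1
              _ ≡ eff (t.push idx).val (t.push idx).lazy f' (2*idx) lx ((lx+rx)/2) p + (if p = pos then add else 0) [ZMOD MODp] := hL_eff p hp1 hp
              _ = eff (t.push idx).val (t.push idx).lazy (f'+1) idx lx rx p + (if p = pos then add else 0) := by rw [e4]
              _ ≡ eff t.val t.lazy (f'+1) idx lx rx p + (if p = pos then add else 0) [ZMOD MODp] :=
                  Int.ModEq.add_right _ (hP_eff p)
          · rw [eff_node_right _ _ f' idx lx rx p (by rw [hzt]; exact hz2) hp]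
            rw [if_neg (by omega), add_zero]
            have e1 : eff (t2.val.set idx ((t2.val.getD (2*idx) 0 + t2.val.getD (2*idx+1) 0) % MODp)) t2.lazy f' (2*idx+1) ((lx+rx)/2) rx p
                = eff t2.val t2.lazy f' (2*idx+1) ((lx+rx)/2) rx p := by
              refine eff_congr _ _ _ _ f' (2*idx+1) ((lx+rx)/2) rx p ?_
              intro j hj
              have : idx ≠ j := fun h => not_sub_strict (2*idx+1) f' idx (by omega) (h ▸ hj)
              exact ⟨getD_set_ne _ _ _ _ this, rfl⟩
            have e2 : eff t2.val t2.lazy f' (2*idx+1) ((lx+rx)/2) rx p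
                = eff (t.push idx).val (t.push idx).lazy f' (2*idx+1) ((lx+rx)/2) rx p := by
              refine eff_congr _ _ _ _ f' (2*idx+1) ((lx+rx)/2) rx p ?_
              intro j hj
              exact hL_frame j (fun hc => sub_siblings idx f' f' j bI.1 hc hj)
            have e4 : eff (t.push idx).val (t.push idx).lazy (f'+1) idx lx rx p
                = eff (t.push idx).val (t.push idx).lazy f' (2*idx+1) ((lx+rx)/2) rx p :=
              eff_node_right _ _ f' idx lx rx p hP_lz1 hp
            calc eff (t2.val.set idx ((t2.val.getD (2*idx) 0 + t2.val.getD (2*idx+1) 0) % MODp)) t2.lazy f' (2*idx+1) ((lx+rx)/2) rx p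
                = eff (t.push idx).val (t.push idx).lazy (f'+1) idx lx rx p := by rw [e1, e2, e4]
              _ ≡ eff t.val t.lazy (f'+1) idx lx rx p [ZMOD MODp] := hP_eff p
      · rw [if_neg hpm]
        obtain ⟨hR_SOK, hR_frame, hR_eff⟩ :=
          ih f' (t.push idx) (2*idx+1) ((lx+rx)/2) rx (by omega) hP_SOK hNR (by omega) hpos2
        set t2 := SegT.pointAdd pos add (t.push idx) fuel (2*idx+1) ((lx+rx)/2) rx with ht2
        show SOK s { t2 with val := t2.val.set idx ((t2.val.getD (2*idx) 0 + t2.val.getD (2*idx+1) 0) % MODp) } ∧ _ ∧ _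
        have hz2 : t2.lazy.getD idx 0 = 1 := by
          rw [(hR_frame idx (not_sub_strict _ _ _ (by omega))).2, hP_lz1]
        refine ⟨sok_set_val s t2 idx _ hR_SOK (rng1_emod _), ?_, ?_⟩
        · intro j hj
          have hji : idx ≠ j := fun h => hj (h ▸ segSub_self idx (f'+1))
          have hjR : ¬ SegSub (2*idx+1) f' j := fun h => hj (sub_child_right _ _ _ h)
          constructor
          · show (t2.val.set idx _).getD j 0 = _
            rw [getD_set_ne _ _ _ _ hji, (hR_frame j hjR).1, (hP_frame j hj).1]
          · show t2.lazy.getD j 0 = _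
            rw [(hR_frame j hjR).2, (hP_frame j hj).2]
        · intro p hp1 hp2
          have hzt : ({ t2 with val := t2.val.set idx ((t2.val.getD (2*idx) 0 + t2.val.getD (2*idx+1) 0) % MODp) } : SegT).lazy = t2.lazy := rfl
          by_cases hp : p < (lx+rx)/2
          · rw [eff_node_left _ _ f' idx lx rx p (by rw [hzt]; exact hz2) hp]
            rw [if_neg (by omega), add_zero]
            have e1 : eff (t2.val.set idx ((t2.val.getD (2*idx) 0 + t2.val.getD (2*idx+1) 0) % MODp)) t2.lazy f' (2*idx) lx ((lx+rx)/2) p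
                = eff t2.val t2.lazy f' (2*idx) lx ((lx+rx)/2) p := by
              refine eff_congr _ _ _ _ f' (2*idx) lx ((lx+rx)/2) p ?_
              intro j hj
              have : idx ≠ j := fun h => not_sub_strict (2*idx) f' idx (by omega) (h ▸ hj)
              exact ⟨getD_set_ne _ _ _ _ this, rfl⟩
            have e2 : eff t2.val t2.lazy f' (2*idx) lx ((lx+rx)/2) p
                = eff (t.push idx).val (t.push idx).lazy f' (2*idx) lx ((lx+rx)/2) p := by
              refine eff_congr _ _ _ _ f' (2*idx) lx ((lx+rx)/2) p ?_
              intro j hj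
              exact hR_frame j (fun hc => sub_siblings idx f' f' j bI.1 hj hc)
            have e4 : eff (t.push idx).val (t.push idx).lazy (f'+1) idx lx rx p
                = eff (t.push idx).val (t.push idx).lazy f' (2*idx) lx ((lx+rx)/2) p :=
              eff_node_left _ _ f' idx lx rx p hP_lz1 hp
            calc eff (t2.val.set idx ((t2.val.getD (2*idx) 0 + t2.val.getD (2*idx+1) 0) % MODp)) t2.lazy f' (2*idx) lx ((lx+rx)/2) p
                = eff (t.push idx).val (t.push idx).lazy (f'+1) idx lx rx p := by rw [e1, e2, e4]
              _ ≡ eff t.val t.lazy (f'+1) idx lx rx p [ZMOD MODp] := hP_eff p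
          · rw [eff_node_right _ _ f' idx lx rx p (by rw [hzt]; exact hz2) hp]
            have e1 : eff (t2.val.set idx ((t2.val.getD (2*idx) 0 + t2.val.getD (2*idx+1) 0) % MODp)) t2.lazy f' (2*idx+1) ((lx+rx)/2) rx p
                = eff t2.val t2.lazy f' (2*idx+1) ((lx+rx)/2) rx p := by
              refine eff_congr _ _ _ _ f' (2*idx+1) ((lx+rx)/2) rx p ?_
              intro j hj
              have : idx ≠ j := fun h => not_sub_strict (2*idx+1) f' idx (by omega) (h ▸ hj)
              exact ⟨getD_set_ne _ _ _ _ this, rfl⟩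
            have e4 : eff (t.push idx).val (t.push idx).lazy (f'+1) idx lx rx p
                = eff (t.push idx).val (t.push idx).lazy f' (2*idx+1) ((lx+rx)/2) rx p :=
              eff_node_right _ _ f' idx lx rx p hP_lz1 hp
            calc eff (t2.val.set idx ((t2.val.getD (2*idx) 0 + t2.val.getD (2*idx+1) 0) % MODp)) t2.lazy f' (2*idx+1) ((lx+rx)/2) rx p
                = eff t2.val t2.lazy f' (2*idx+1) ((lx+rx)/2) rx p := e1
              _ ≡ eff (t.push idx).val (t.push idx).lazy f' (2*idx+1) ((lx+rx)/2) rx p + (if p = pos then add else 0) [ZMOD MODp] := hR_eff p (by omega) hp2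
              _ = eff (t.push idx).val (t.push idx).lazy (f'+1) idx lx rx p + (if p = pos then add else 0) := by rw [e4]
              _ ≡ eff t.val t.lazy (f'+1) idx lx rx p + (if p = pos then add else 0) [ZMOD MODp] :=
                  Int.ModEq.add_right _ (hP_eff p)

theorem getPoint_spec (s : Nat) (pos : Nat) :
    ∀ fuel f t idx lx rx, f < fuel → SOK s t → NodeInv s f idx lx rx → lx ≤ pos → pos < rx →
    SOK s (SegT.getPoint pos t fuel idx lx rx).2 ∧
    (∀ j, ¬ SegSub idx f j → (SegT.getPoint pos t fuel idx lx rx).2.val.getD j 0 = t.val.getD j 0 ∧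
        (SegT.getPoint pos t fuel idx lx rx).2.lazy.getD j 0 = t.lazy.getD j 0) ∧
    (∀ p, lx ≤ p → p < rx →
      eff (SegT.getPoint pos t fuel idx lx rx).2.val (SegT.getPoint pos t fuel idx lx rx).2.lazy f idx lx rx p
        ≡ eff t.val t.lazy f idx lx rx p [ZMOD MODp]) ∧
    Rng1 (SegT.getPoint pos t fuel idx lx rx).1 ∧
    (SegT.getPoint pos t fuel idx lx rx).1 ≡ eff t.val t.lazy f idx lx rx pos [ZMOD MODp] := by
  intro fuel
  induction fuel with
  | zero => intro f t idx lx rx hf; omega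
  | succ fuel ih =>
    intro f t idx lx rx hf hS hN hpos1 hpos2
    have bI := nodeInv_bounds _ _ _ _ _ hN
    simp only [SegT.getPoint]
    by_cases hleaf : rx - lx = 1
    · rw [if_pos hleaf]
      have hf0 : f = 0 := by
        cases f with
        | zero => rfl
        | succ f' =>
          exfalso
          obtain ⟨h1, _, _⟩ := hN
          have : (2:Nat) ≤ 2^(f'+1) := by
            calc (2:Nat) = 2^1 := by norm_num
              _ ≤ 2^(f'+1) := Nat.pow_le_pow_right (by norm_num) (by omega)
          omega
      subst hf0
      exact ⟨hS, fun j _ => ⟨rfl, rfl⟩, fun p _ _ => Int.ModEq.refl _, (hS.2.2.2 idx).1, Int.ModEq.refl _⟩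
    · rw [if_neg hleaf]
      obtain ⟨f', rfl⟩ : ∃ f', f = f'+1 := by
        cases f with
        | zero =>
          exfalso
          obtain ⟨h1, _, _⟩ := hN
          simp only [pow_zero] at h1
          omega
        | succ f' => exact ⟨f', rfl⟩
      have hmid := mid_eq s f' idx lx rx hN
      have hNL := nodeInv_left s f' idx lx rx hN
      have hNR := nodeInv_right s f' idx lx rx hN
      obtain ⟨hP_SOK, hP_frame, hP_lz1, hP_eff⟩ := push_spec s t f' idx lx rx hS hN
      by_cases hpm : pos < (lx+rx)/2
      · rw [if_pos hpm]
        obtain ⟨hG_SOK, hG_frame, hG_eff, hG_rng, hG_val⟩ :=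
          ih f' (t.push idx) (2*idx) lx ((lx+rx)/2) (by omega) hP_SOK hNL hpos1 hpm
        set P := SegT.getPoint pos (t.push idx) fuel (2*idx) lx ((lx+rx)/2) with hP
        have hz2 : P.2.lazy.getD idx 0 = 1 := by
          rw [(hG_frame idx (not_sub_strict _ _ _ (by omega))).2, hP_lz1]
        refine ⟨hG_SOK, ?_, ?_, hG_rng, ?_⟩
        · intro j hj
          have hjL : ¬ SegSub (2*idx) f' j := fun h => hj (sub_child_left _ _ _ h)
          exact ⟨((hG_frame j hjL).1).trans (hP_frame j hj).1,
                 ((hG_frame j hjL).2).trans (hP_frame j hj).2⟩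
        · intro p hp1 hp2
          by_cases hp : p < (lx+rx)/2
          · rw [eff_node_left _ _ f' idx lx rx p hz2 hp]
            calc eff P.2.val P.2.lazy f' (2*idx) lx ((lx+rx)/2) p
                ≡ eff (t.push idx).val (t.push idx).lazy f' (2*idx) lx ((lx+rx)/2) p [ZMOD MODp] := hG_eff p hp1 hp
              _ = eff (t.push idx).val (t.push idx).lazy (f'+1) idx lx rx p :=
                  (eff_node_left _ _ f' idx lx rx p hP_lz1 hp).symm
              _ ≡ eff t.val t.lazy (f'+1) idx lx rx p [ZMOD MODp] := hP_eff p
          · rw [eff_node_right _ _ f' idx lx rx p hz2 hp]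
            have e2 : eff P.2.val P.2.lazy f' (2*idx+1) ((lx+rx)/2) rx p
                = eff (t.push idx).val (t.push idx).lazy f' (2*idx+1) ((lx+rx)/2) rx p := by
              refine eff_congr _ _ _ _ f' (2*idx+1) ((lx+rx)/2) rx p ?_
              intro j hj
              exact hG_frame j (fun hc => sub_siblings idx f' f' j bI.1 hc hj)
            calc eff P.2.val P.2.lazy f' (2*idx+1) ((lx+rx)/2) rx p
                = eff (t.push idx).val (t.push idx).lazy (f'+1) idx lx rx p := by
                  rw [e2, eff_node_right _ _ f' idx lx rx p hP_lz1 hp]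
              _ ≡ eff t.val t.lazy (f'+1) idx lx rx p [ZMOD MODp] := hP_eff p
        · calc P.1 ≡ eff (t.push idx).val (t.push idx).lazy f' (2*idx) lx ((lx+rx)/2) pos [ZMOD MODp] := hG_val
            _ = eff (t.push idx).val (t.push idx).lazy (f'+1) idx lx rx pos :=
                (eff_node_left _ _ f' idx lx rx pos hP_lz1 hpm).symm
            _ ≡ eff t.val t.lazy (f'+1) idx lx rx pos [ZMOD MODp] := hP_eff pos
      · rw [if_neg hpm]
        obtain ⟨hG_SOK, hG_frame, hG_eff, hG_rng, hG_val⟩ :=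
          ih f' (t.push idx) (2*idx+1) ((lx+rx)/2) rx (by omega) hP_SOK hNR (by omega) hpos2
        set P := SegT.getPoint pos (t.push idx) fuel (2*idx+1) ((lx+rx)/2) rx with hP
        have hz2 : P.2.lazy.getD idx 0 = 1 := by
          rw [(hG_frame idx (not_sub_strict _ _ _ (by omega))).2, hP_lz1]
        refine ⟨hG_SOK, ?_, ?_, hG_rng, ?_⟩
        · intro j hj
          have hjR : ¬ SegSub (2*idx+1) f' j := fun h => hj (sub_child_right _ _ _ h)
          exact ⟨((hG_frame j hjR).1).trans (hP_frame j hj).1,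
                 ((hG_frame j hjR).2).trans (hP_frame j hj).2⟩
        · intro p hp1 hp2
          by_cases hp : p < (lx+rx)/2
          · rw [eff_node_left _ _ f' idx lx rx p hz2 hp]
            have e2 : eff P.2.val P.2.lazy f' (2*idx) lx ((lx+rx)/2) p
                = eff (t.push idx).val (t.push idx).lazy f' (2*idx) lx ((lx+rx)/2) p := by
              refine eff_congr _ _ _ _ f' (2*idx) lx ((lx+rx)/2) p ?_
              intro j hj
              exact hG_frame j (fun hc => sub_siblings idx f' f' j bI.1 hj hc)
            calc eff P.2.val P.2.lazy f' (2*idx) lx ((lx+rx)/2) p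
                = eff (t.push idx).val (t.push idx).lazy (f'+1) idx lx rx p := by
                  rw [e2, eff_node_left _ _ f' idx lx rx p hP_lz1 hp]
              _ ≡ eff t.val t.lazy (f'+1) idx lx rx p [ZMOD MODp] := hP_eff p
          · rw [eff_node_right _ _ f' idx lx rx p hz2 hp]
            calc eff P.2.val P.2.lazy f' (2*idx+1) ((lx+rx)/2) rx p
                ≡ eff (t.push idx).val (t.push idx).lazy f' (2*idx+1) ((lx+rx)/2) rx p [ZMOD MODp] := hG_eff p (by omega) hp2
              _ = eff (t.push idx).val (t.push idx).lazy (f'+1) idx lx rx p :=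
                  (eff_node_right _ _ f' idx lx rx p hP_lz1 hp).symm
              _ ≡ eff t.val t.lazy (f'+1) idx lx rx p [ZMOD MODp] := hP_eff p
        · calc P.1 ≡ eff (t.push idx).val (t.push idx).lazy f' (2*idx+1) ((lx+rx)/2) rx pos [ZMOD MODp] := hG_val
            _ = eff (t.push idx).val (t.push idx).lazy (f'+1) idx lx rx pos :=
                (eff_node_right _ _ f' idx lx rx pos hP_lz1 hpm).symm
            _ ≡ eff t.val t.lazy (f'+1) idx lx rx pos [ZMOD MODp] := hP_eff pos

theorem grow_pow : ∀ (fuel size n : Nat), 1 ≤ size → (∃ d, size = 2^d) → n ≤ size + fuel →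
    ∃ D, growSize fuel size n = 2^D ∧ n ≤ 2^D := by
  intro fuel
  induction fuel with
  | zero =>
    intro size n h1 ⟨d, hd⟩ hn
    exact ⟨d, by simpa [growSize] using hd, by omega⟩
  | succ fuel ih =>
    intro size n h1 ⟨d, hd⟩ hn
    by_cases h : size < n
    · have := ih (size*2) n (by omega) ⟨d+1, by rw [hd]; ring⟩ (by omega)
      simpa [growSize, h] using this
    · exact ⟨d, by simp only [growSize, if_neg h]; exact hd, by omega⟩

theorem bisectGo_le (a : List Int) (x : Int) :
    ∀ fuel lo hi, lo ≤ hi → bisectGo a x fuel lo hi ≤ hi := by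
  intro fuel
  induction fuel with
  | zero => intro lo hi h; simpa [bisectGo]
  | succ fuel ih =>
    intro lo hi h
    by_cases hlt : lo < hi
    · simp only [bisectGo, if_pos hlt]
      split
      · exact ih _ _ (by omega)
      · exact le_trans (ih lo ((lo+hi)/2) (by omega)) (by omega)
    · simpa [bisectGo, hlt]

theorem pyBisectLeft_le (a : List Int) (x : Int) : pyBisectLeft a x ≤ a.length :=
  bisectGo_le a x (a.length+1) 0 a.length (by omega)

theorem getD_replicate' (n : Nat) (a : Int) (j : Nat) :
    (List.replicate n a).getD j 0 = if j < n then a else 0 := by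
  simp only [List.getD, List.getElem?_replicate]
  split
  · rfl
  · rfl

theorem double_fold (n : Nat) :
    ∀ (a : Nat) (dp : List Int), a + n ≤ dp.length →
    ((List.range' a n).foldl (fun d j => d.set j ((d.getD j 0 * 2) % MODp)) dp).length = dp.length ∧
    ∀ q, ((List.range' a n).foldl (fun d j => d.set j ((d.getD j 0 * 2) % MODp)) dp).getD q 0
      = if a ≤ q ∧ q < a+n then (dp.getD q 0 * 2) % MODp else dp.getD q 0 := by
  induction n with
  | zero =>
    intro a dp h
    refine ⟨rfl, fun q => ?_⟩
    rw [if_neg (by omega)]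
    rfl
  | succ n ih =>
    intro a dp h
    have hcons : List.range' a (n+1) = a :: List.range' (a+1) n := by rw [List.range'_succ]
    rw [hcons]
    simp only [List.foldl_cons]
    have hlen1 : (dp.set a ((dp.getD a 0 * 2) % MODp)).length = dp.length := by simp
    obtain ⟨ihl, ihq⟩ := ih (a+1) (dp.set a ((dp.getD a 0 * 2) % MODp)) (by omega)
    refine ⟨by rw [ihl, hlen1], fun q => ?_⟩
    rw [ihq q]
    by_cases hq1 : a+1 ≤ q ∧ q < a+1+n
    · rw [if_pos hq1, if_pos (by omega), getD_set_ne _ _ _ _ (by omega)]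
    · rw [if_neg hq1]
      by_cases hqa : q = a
      · subst hqa
        rw [if_pos (by omega), getD_set_eq _ _ _ (by omega)]
      · rw [if_neg (by omega), getD_set_ne _ _ _ _ (fun hh => hqa hh.symm)]

-- proof-side names for the two loop bodies (definitionally the lambdas in the ports)
def stepA (k : Nat) (target : List Int) (t : SegT) (x : Int) : SegT :=
  let pos := pyBisectLeft target x
  let p := if pos < k ∧ target.getD pos 0 = x then SegT.getPoint pos t (t.size+1) 1 0 t.size else (0, t)
  let add := p.1
  let t1 := p.2
  let t2 := if pos + 1 ≤ k then SegT.rangeMul (pos+1) (k+1) 2 t1 (t1.size+1) 1 0 t1.size else t1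
  if add ≠ 0 then SegT.pointAdd (pos+1) add t2 (t2.size+1) 1 0 t2.size else t2

def stepB (k : Nat) (target : List Int) (dp : List Int) (x : Int) : List Int :=
  let pos := pyBisectLeft target x
  let add := if pos < k ∧ target.getD pos 0 = x then dp.getD pos 0 else 0
  let dp1 := (List.range' (pos+1) (k - pos)).foldl (fun d j => d.set j ((d.getD j 0 * 2) % MODp)) dp
  if pos < k then dp1.set (pos+1) ((dp1.getD (pos+1) 0 + add) % MODp) else dp1

theorem count_eq_alt (arr target : List Int) :
    count_with_target arr target = count_with_target_alt arr target := by
  obtain ⟨D, hsD, hks⟩ := grow_pow (target.length+1) 1 (target.length+1) (by omega) ⟨0, rfl⟩ (by omega)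
  set k := target.length with hk
  set s := growSize (k+1) 1 (k+1) with hs
  have hDs : D < s + 1 := by
    have := Nat.lt_two_pow_self (n := D)
    omega
  have NI : NodeInv s D 1 0 s := ⟨by omega, by omega, le_refl s⟩
  -- the step preserves the invariant
  have step : ∀ (t : SegT) (dp : List Int) (x : Int), SOK s t → dp.length = k+1 →
      (∀ q, q ≤ k → Rng1 (dp.getD q 0) ∧ dp.getD q 0 ≡ eff t.val t.lazy D 1 0 s q [ZMOD MODp]) →
      SOK s (stepA k target t x) ∧ (stepB k target dp x).length = k+1 ∧
      (∀ q, q ≤ k → Rng1 ((stepB k target dp x).getD q 0) ∧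
        (stepB k target dp x).getD q 0 ≡ eff (stepA k target t x).val (stepA k target t x).lazy D 1 0 s q [ZMOD MODp]) := by
    intro t dp x hS hdplen hdp
    have hposk : pyBisectLeft target x ≤ k := pyBisectLeft_le target x
    simp only [stepA, stepB]
    set pos := pyBisectLeft target x with hposdef
    rw [hS.1]
    by_cases hcond : pos < k ∧ target.getD pos 0 = x
    · rw [if_pos hcond, if_pos hcond]
      obtain ⟨hG_SOK, hG_frame, hG_eff, hG_rng, hG_val⟩ :=
        getPoint_spec s pos (s+1) D t 1 0 s hDs hS NI (by omega) (by omega)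
      set G := SegT.getPoint pos t (s+1) 1 0 s with hG
      rw [if_pos (by omega : pos + 1 ≤ k), hG_SOK.1]
      obtain ⟨hM_SOK, hM_frame, hM_eff⟩ :=
        rangeMul_spec s (pos+1) (k+1) 2 (s+1) D G.2 1 0 s hDs hG_SOK NI
      set t2 := SegT.rangeMul (pos+1) (k+1) 2 G.2 (s+1) 1 0 s with ht2
      have hadd_eq : G.1 = dp.getD pos 0 :=
        modeq_rng_eq _ _ (hG_val.trans ((hdp pos (by omega)).2).symm) hG_rng (hdp pos (by omega)).1
      -- the final conditional point-add of A
      have hT : SOK s (if G.1 ≠ 0 then SegT.pointAdd (pos+1) G.1 t2 (t2.size+1) 1 0 t2.size else t2) ∧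
          ∀ q, q ≤ k →
            eff (if G.1 ≠ 0 then SegT.pointAdd (pos+1) G.1 t2 (t2.size+1) 1 0 t2.size else t2).val
                (if G.1 ≠ 0 then SegT.pointAdd (pos+1) G.1 t2 (t2.size+1) 1 0 t2.size else t2).lazy D 1 0 s q
              ≡ eff t2.val t2.lazy D 1 0 s q + (if q = pos+1 then G.1 else 0) [ZMOD MODp] := by
        by_cases hadd : G.1 ≠ 0
        · rw [if_pos hadd, hM_SOK.1]
          obtain ⟨hA_SOK, _, hA_eff⟩ :=
            pointAdd_spec s (pos+1) G.1 (s+1) D t2 1 0 s hDs hM_SOK NI (by omega) (by omega)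
          exact ⟨hA_SOK, fun q hq => hA_eff q (by omega) (by omega)⟩
        · rw [if_neg hadd]
          push_neg at hadd
          refine ⟨hM_SOK, fun q hq => ?_⟩
          rw [hadd]
          simp
      -- B side
      obtain ⟨hd1len, hd1q⟩ := double_fold (k - pos) (pos+1) dp (by omega)
      set dp1 := (List.range' (pos+1) (k - pos)).foldl (fun d j => d.set j ((d.getD j 0 * 2) % MODp)) dp with hdp1
      rw [if_pos hcond.1]
      refine ⟨hT.1, by rw [List.length_set, hd1len, hdplen], ?_⟩
      intro q hq
      constructor
      · by_cases hq1 : q = pos+1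
        · subst hq1
          rw [getD_set_eq _ _ _ (by rw [hd1len, hdplen]; omega)]
          exact rng1_emod _
        · rw [getD_set_ne _ _ _ _ (fun hh => hq1 hh.symm), hd1q q]
          split
          · exact rng1_emod _
          · exact (hdp q hq).1
      · have hchain : eff (if G.1 ≠ 0 then SegT.pointAdd (pos+1) G.1 t2 (t2.size+1) 1 0 t2.size else t2).val
            (if G.1 ≠ 0 then SegT.pointAdd (pos+1) G.1 t2 (t2.size+1) 1 0 t2.size else t2).lazy D 1 0 s q
            ≡ eff t.val t.lazy D 1 0 s q * (if pos+1 ≤ q ∧ q < k+1 then 2 else 1) + (if q = pos+1 then G.1 else 0) [ZMOD MODp] := by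
          refine (hT.2 q hq).trans (Int.ModEq.add_right _ ?_)
          refine (hM_eff q (by omega) (by omega)).trans (Int.ModEq.mul_right _ ?_)
          exact hG_eff q (by omega) (by omega)
        refine Int.ModEq.symm (hchain.trans (Int.ModEq.symm ?_))
        by_cases hq1 : q = pos+1
        · subst hq1
          rw [getD_set_eq _ _ _ (by rw [hd1len, hdplen]; omega), hd1q, if_pos (by omega),
              if_pos (by omega), if_pos rfl, ← hadd_eq]
          calc ((dp.getD (pos+1) 0 * 2) % MODp + G.1) % MODp
              ≡ dp.getD (pos+1) 0 * 2 + G.1 [ZMOD MODp] :=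
                (emod_modEq _).trans (Int.ModEq.add_right _ (emod_modEq _))
            _ ≡ eff t.val t.lazy D 1 0 s (pos+1) * 2 + G.1 [ZMOD MODp] :=
                Int.ModEq.add_right _ (Int.ModEq.mul_right _ (hdp (pos+1) (by omega)).2)
        · rw [getD_set_ne _ _ _ _ (fun hh => hq1 hh.symm), hd1q q, if_neg hq1, add_zero]
          by_cases hq2 : pos+1 ≤ q ∧ q < pos+1+(k-pos)
          · rw [if_pos hq2, if_pos (by omega)]
            exact (emod_modEq _).trans (Int.ModEq.mul_right _ (hdp q hq).2)
          · rw [if_neg hq2, if_neg (by omega), mul_one]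
            exact (hdp q hq).2
    · rw [if_neg hcond, if_neg hcond]
      simp only [ne_eq, not_true_eq_false, if_false]
      by_cases hposlt : pos < k
      · rw [if_pos (by omega : pos + 1 ≤ k), if_pos hposlt, hS.1]
        obtain ⟨hM_SOK, hM_frame, hM_eff⟩ :=
          rangeMul_spec s (pos+1) (k+1) 2 (s+1) D t 1 0 s hDs hS NI
        obtain ⟨hd1len, hd1q⟩ := double_fold (k - pos) (pos+1) dp (by omega)
        set dp1 := (List.range' (pos+1) (k - pos)).foldl (fun d j => d.set j ((d.getD j 0 * 2) % MODp)) dp with hdp1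
        refine ⟨hM_SOK, by rw [List.length_set, hd1len, hdplen], ?_⟩
        intro q hq
        have hset : (dp1.set (pos+1) ((dp1.getD (pos+1) 0 + 0) % MODp)).getD q 0 = dp1.getD q 0 := by
          by_cases hq1 : q = pos+1
          · subst hq1
            rw [getD_set_eq _ _ _ (by rw [hd1len, hdplen]; omega), add_zero, hd1q, if_pos (by omega),
                Int.emod_emod_of_dvd _ dvd_rfl]
          · exact getD_set_ne _ _ _ _ (fun hh => hq1 hh.symm)
        rw [hset, hd1q q]
        constructor
        · split
          · exact rng1_emod _
          · exact (hdp q hq).1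
        · have hchain := (hM_eff q (by omega) (by omega))
          refine Int.ModEq.symm (hchain.trans (Int.ModEq.symm ?_))
          by_cases hq2 : pos+1 ≤ q ∧ q < pos+1+(k-pos)
          · rw [if_pos hq2, if_pos (by omega)]
            exact (emod_modEq _).trans (Int.ModEq.mul_right _ (hdp q hq).2)
          · rw [if_neg hq2, if_neg (by omega), mul_one]
            exact (hdp q hq).2
      · rw [if_neg (by omega : ¬ pos + 1 ≤ k), if_neg hposlt]
        have hempty : k - pos = 0 := by omega
        rw [hempty]
        exact ⟨hS, hdplen, hdp⟩
  -- invariant carried through the fold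
  have main : ∀ (as : List Int) (t : SegT) (dp : List Int), SOK s t → dp.length = k+1 →
      (∀ q, q ≤ k → Rng1 (dp.getD q 0) ∧ dp.getD q 0 ≡ eff t.val t.lazy D 1 0 s q [ZMOD MODp]) →
      SOK s (as.foldl (stepA k target) t) ∧ (as.foldl (stepB k target) dp).length = k+1 ∧
      (∀ q, q ≤ k → Rng1 ((as.foldl (stepB k target) dp).getD q 0) ∧
        (as.foldl (stepB k target) dp).getD q 0
          ≡ eff (as.foldl (stepA k target) t).val (as.foldl (stepA k target) t).lazy D 1 0 s q [ZMOD MODp]) := by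
    intro as
    induction as with
    | nil => intro t dp h1 h2 h3; exact ⟨h1, h2, h3⟩
    | cons x as iha =>
      intro t dp h1 h2 h3
      obtain ⟨g1, g2, g3⟩ := step t dp x h1 h2 h3
      simpa using iha (stepA k target t x) (stepB k target dp x) g1 g2 g3
  -- initial state
  have hinit_SOK : SOK s (SegT.init (k+1)) := by
    refine ⟨hs.symm, ?_, ?_, ?_⟩
    · show (List.replicate (2*s) (0:Int)).length = 2*s
      simp
    · show (List.replicate (2*s) (1:Int)).length = 2*s
      simp
    intro j
    constructor
    · show Rng1 ((List.replicate (2*s) (0:Int)).getD j 0)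
      rw [getD_replicate']
      split
      · exact ⟨le_refl 0, MODp_pos⟩
      · exact ⟨le_refl 0, MODp_pos⟩
    · show Rng1 ((List.replicate (2*s) (1:Int)).getD j 0)
      rw [getD_replicate']
      split
      · exact ⟨by norm_num, by decide⟩
      · exact ⟨le_refl 0, MODp_pos⟩
  have hinit_zero : ∀ q, eff (SegT.init (k+1)).val (SegT.init (k+1)).lazy D 1 0 s q = 0 := by
    intro q
    refine eff_zero _ _ (fun j => ?_) D 1 0 s q
    show (List.replicate (2*s) (0:Int)).getD j 0 = 0
    rw [getD_replicate']
    split <;> rfl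
  obtain ⟨hI_SOK, _, hI_eff⟩ :=
    pointAdd_spec s 0 1 (s+1) D (SegT.init (k+1)) 1 0 s hDs hinit_SOK NI (le_refl 0) (by omega)
  set T1 := SegT.pointAdd 0 1 (SegT.init (k+1)) (s+1) 1 0 s with hT1
  have hdp0 : ∀ q, q ≤ k → Rng1 (((List.replicate (k+1) (0:Int)).set 0 1).getD q 0) ∧
      ((List.replicate (k+1) (0:Int)).set 0 1).getD q 0 ≡ eff T1.val T1.lazy D 1 0 s q [ZMOD MODp] := by
    intro q hq
    have heffq : eff T1.val T1.lazy D 1 0 s q ≡ (if q = 0 then (1:Int) else 0) [ZMOD MODp] := by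
      refine (hI_eff q (by omega) (by omega)).trans ?_
      rw [hinit_zero q, zero_add]
    by_cases hq0 : q = 0
    · subst hq0
      rw [getD_set_eq _ _ _ (by simp)]
      exact ⟨⟨by norm_num, by decide⟩, (heffq.trans (by rw [if_pos rfl])).symm⟩
    · rw [getD_set_ne _ _ _ _ (fun hh => hq0 hh.symm), getD_replicate', if_pos (by omega)]
      exact ⟨⟨le_refl 0, MODp_pos⟩, (heffq.trans (by rw [if_neg hq0])).symm⟩
  obtain ⟨hF_SOK, hF_len, hF_inv⟩ :=
    main arr T1 ((List.replicate (k+1) (0:Int)).set 0 1) hI_SOK (by simp) hdp0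
  set TF := arr.foldl (stepA k target) T1 with hTF
  set dpF := arr.foldl (stepB k target) ((List.replicate (k+1) (0:Int)).set 0 1) with hdpF
  obtain ⟨_, _, _, _, hV⟩ :=
    getPoint_spec s k (s+1) D TF 1 0 s hDs hF_SOK NI (by omega) (by omega)
  have eqA : count_with_target arr target
      = (SegT.getPoint k TF (TF.size+1) 1 0 TF.size).1 % MODp := rfl
  have eqB : count_with_target_alt arr target = dpF.getD k 0 % MODp := rfl
  rw [eqA, eqB, hF_SOK.1]
  exact hV.trans ((hF_inv k (le_refl k)).2).symm

-- ===== VERDICT (by name: the statement is the Claim_ definition above) =====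
theorem count_with_target_spec : Claim_equal_count_with_target := by
  intro arr target _
  unfold Spec_count_with_target
  exact count_eq_alt arr target
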